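-- pv_equiv track=rewrite | github.com/LennartElbe/codeEvo | StudentProblem/10.21.9.45/2/1569575607.py | gen_palindromic
-- ===== SOURCE A (Python) =====
-- def gen_palindromic(n: int):
--     """
--     Generates palindromes smaller or equal to a given integer.
--     n: An integer
--     """
--     if n > 0:
--         for a in range(n + 1):
--             res = str(a)
--             if res[-1::-1] == str(a):
--                 yield a
--     else:
--         raise StopIteration
-- ===== SOURCE B (Python) =====
-- def gen_palindromic(n: int):
--     """
--     Generates palindromes smaller or equal to a given integer.
--     n: An integer
--     """
--     if n > 0:
--         for a in range(n + 1):
--             rev, m = 0, a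
--             while m > 0:
--                 rev = rev * 10 + m % 10
--                 m //= 10
--             if rev == a:
--                 yield a
-- ===== Notes on version B (the rewrite author's own statement) =====
-- stated objective: alternative
-- what changed: B tests palindromicity by reversing the number arithmetically (a divmod accumulator loop, rev == a) instead of building the decimal string and comparing it with its slice-reversal; B never constructs a string.
-- crash fix: For n <= 0 A executes 'raise StopIteration' inside a generator, which surfaces as RuntimeError when iterated; B's generator simply yields nothing there, so list(gen_palindromic(n)) == []. — e.g. on gen_palindromic(0): A raises RuntimeError, B returns []
import Mathlib
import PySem

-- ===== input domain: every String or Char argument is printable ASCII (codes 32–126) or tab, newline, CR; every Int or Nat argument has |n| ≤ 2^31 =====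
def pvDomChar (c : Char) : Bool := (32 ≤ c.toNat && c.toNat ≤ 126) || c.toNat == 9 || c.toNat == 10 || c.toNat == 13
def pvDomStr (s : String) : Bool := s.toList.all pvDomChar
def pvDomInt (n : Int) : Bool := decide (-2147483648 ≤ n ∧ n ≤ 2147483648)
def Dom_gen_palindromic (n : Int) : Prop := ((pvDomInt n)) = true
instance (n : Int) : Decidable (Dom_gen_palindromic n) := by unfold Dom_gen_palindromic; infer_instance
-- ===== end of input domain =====

-- B replaces A's string-build-and-slice palindrome test by an arithmetic digit-reversal loop (alternative, no strings).
-- Both versions are Python GENERATORS; equivalence is about the list of yielded values.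


-- ===== PORT A =====
-- for n ≤ 0 the Python raises ('raise StopIteration' inside a generator → RuntimeError); excluded by Pre_
def gen_palindromic (n : Int) : List Int :=
  if n > 0 then
    (PySem.List.pyRange 0 (n + 1) 1).foldl
      (fun acc a =>
        let res := PySem.Int.toStr a
        if PySem.Str.slice? res (some (-1)) none (-1) = some (PySem.Int.toStr a) then acc ++ [a]
        else acc) []
  else []

-- ===== PORT B =====
-- the 'while m > 0: rev = rev*10 + m%10; m //= 10' loop of Source B
def pvRevLoop (m rev : Int) : Int :=
  if 0 < m then pvRevLoop (PySem.Int.floordiv m 10) (rev * 10 + PySem.Int.mod m 10) else rev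
termination_by m.toNat
decreasing_by
  rw [PySem.Int.floordiv_eq_ediv_of_pos (by norm_num)]
  omega

def gen_palindromic_alt (n : Int) : List Int :=
  if n > 0 then
    (PySem.List.pyRange 0 (n + 1) 1).foldl
      (fun acc a => if pvRevLoop a 0 = a then acc ++ [a] else acc) []
  else []

-- ===== PRECONDITION & SPEC =====
def Pre_gen_palindromic (n : Int) : Prop := 0 < n
instance (n : Int) : Decidable (Pre_gen_palindromic n) := by unfold Pre_gen_palindromic; infer_instance
def pvWitness_gen_palindromic : Int := (12)

-- For n ≤ 0 A raises (StopIteration inside a generator → RuntimeError on iteration); B's generator yields nothing, i.e. [].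
def Raises_gen_palindromic (n : Int) : Prop := n ≤ 0
instance (n : Int) : Decidable (Raises_gen_palindromic n) := by unfold Raises_gen_palindromic; infer_instance
def pvRaiseWitness_gen_palindromic : Int := (0)
def pvRaiseWitnessOut_gen_palindromic : List Int := []

def Spec_gen_palindromic (n : Int) (out : List Int) : Prop := out = gen_palindromic_alt n
instance (n : Int) (out : List Int) : Decidable (Spec_gen_palindromic n out) := by unfold Spec_gen_palindromic; infer_instance

-- ===== CLAIM (what is proved, stated in full; the proofs are below) =====
def Claim_equal_gen_palindromic : Prop := ∀ (n : Int), Dom_gen_palindromic n → Pre_gen_palindromic n → Spec_gen_palindromic n (gen_palindromic n)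
def Claim_raises_gen_palindromic : Prop := (∀ (n : Int), Dom_gen_palindromic n → Raises_gen_palindromic n → ¬ Pre_gen_palindromic n) ∧ (Dom_gen_palindromic (pvRaiseWitness_gen_palindromic) ∧ Raises_gen_palindromic (pvRaiseWitness_gen_palindromic) ∧ gen_palindromic_alt (pvRaiseWitness_gen_palindromic) = pvRaiseWitnessOut_gen_palindromic)

-- ===== LEMMAS AND PROOFS =====

-- s[-1::-1] computes the same slice bounds as s[::-1]
lemma pv_sliceIndices_neg_one (n : ℕ) :
    PySem.List.sliceIndices n (some (-1)) none (-1) = PySem.List.sliceIndices n none none (-1) := by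
  simp only [PySem.List.sliceIndices]
  norm_num
  omega

lemma pv_slice_shift (xs : List Char) :
    PySem.List.slice? xs (some (-1)) none (-1) = PySem.List.slice? xs none none (-1) := by
  simp only [PySem.List.slice?, pv_sliceIndices_neg_one]

lemma pv_slice_start_neg_one (xs : List Char) :
    PySem.Chars.slice? xs (some (-1)) none (-1) = some xs.reverse := by
  have h : PySem.List.slice? xs (some (-1)) none (-1) = some xs.reverse := by
    rw [pv_slice_shift, PySem.List.slice?_none_none_neg_one]
  exact h

-- Nat.toDigits is the decimal digit string, most significant digit first
lemma pv_toDigitsCore_eq : ∀ (f m : ℕ) (l : List Char), 0 < m → m < f →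
    Nat.toDigitsCore 10 f m l = ((Nat.digits 10 m).map Nat.digitChar).reverse ++ l := by
  intro f
  induction f with
  | zero => intro m l hm hf; omega
  | succ f ih =>
    intro m l hm hf
    simp only [Nat.toDigitsCore]
    by_cases h : m / 10 = 0
    · have hlt : m < 10 := by omega
      rw [if_pos h, Nat.digits_def' (by norm_num) hm, h, Nat.mod_eq_of_lt hlt]
      simp
    · have h10 : 0 < m / 10 := Nat.pos_of_ne_zero h
      have hfd : m / 10 < f := by omega
      rw [if_neg h, ih (m / 10) _ h10 hfd, Nat.digits_def' (by norm_num) hm]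
      simp

lemma pv_toDigits10 (m : ℕ) (hm : 0 < m) :
    Nat.toDigits 10 m = ((Nat.digits 10 m).map Nat.digitChar).reverse := by
  have := pv_toDigitsCore_eq (m + 1) m [] hm (Nat.lt_succ_self m)
  simpa [Nat.toDigits] using this

-- digitChar is injective on digits
lemma pv_map_digitChar_inj : ∀ (L M : List ℕ), (∀ x ∈ L, x < 10) → (∀ x ∈ M, x < 10) →
    L.map Nat.digitChar = M.map Nat.digitChar → L = M := by
  intro L
  induction L with
  | nil => intro M _ _ h; cases M <;> simp_all
  | cons a L ih =>
    intro M hL hM h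
    cases M with
    | nil => simp_all
    | cons b M =>
      simp only [List.map_cons, List.cons.injEq] at h
      have ha : a < 10 := hL a (by simp)
      have hb : b < 10 := hM b (by simp)
      have hab : a = b := by
        have hinj : ∀ x < 10, ∀ y < 10, Nat.digitChar x = Nat.digitChar y → x = y := by decide
        exact hinj a ha b hb h.1
      refine List.cons_eq_cons.mpr ⟨hab, ih M (fun x hx => hL x (by simp [hx])) (fun x hx => hM x (by simp [hx])) h.2⟩

-- the value of B's reversal loop
lemma pv_revLoop_eq (m : ℕ) : ∀ r : ℤ,
    pvRevLoop (↑m) r = r * 10 ^ (Nat.digits 10 m).length + ((Nat.ofDigits 10 (Nat.digits 10 m).reverse : ℕ) : ℤ) := by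
  induction m using Nat.strong_induction_on with
  | _ m ih =>
    intro r
    rw [pvRevLoop]
    by_cases hm : 0 < m
    · have hd : PySem.Int.floordiv (↑m) 10 = ((m / 10 : ℕ) : ℤ) := by
        rw [PySem.Int.floordiv_eq_ediv_of_pos (by norm_num)]; omega
      have hmod : PySem.Int.mod (↑m) 10 = ((m % 10 : ℕ) : ℤ) := by
        rw [PySem.Int.mod_eq_emod_of_pos (by norm_num)]; omega
      rw [if_pos (by exact_mod_cast hm), hd, hmod,
        ih (m / 10) (Nat.div_lt_self hm (by norm_num)),
        Nat.digits_def' (b := 10) (by norm_num) hm]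
      simp only [List.reverse_cons, List.length_cons]
      rw [Nat.ofDigits_append, Nat.ofDigits_singleton, List.length_reverse]
      push_cast
      ring
    · have h0 : m = 0 := by omega
      rw [if_neg (by exact_mod_cast hm), h0]
      simp

lemma pv_rev_eq_iff (m : ℕ) :
    (pvRevLoop (↑m) 0 = ↑m) ↔ (Nat.digits 10 m).reverse = Nat.digits 10 m := by
  rw [pv_revLoop_eq m 0, zero_mul, zero_add]
  constructor
  · intro h
    have hnat : Nat.ofDigits 10 (Nat.digits 10 m).reverse = Nat.ofDigits 10 (Nat.digits 10 m) := by
      rw [Nat.ofDigits_digits]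
      exact_mod_cast h
    exact Nat.ofDigits_inj_of_len_eq (by norm_num) (by simp)
      (fun x hx => Nat.digits_lt_base (by norm_num) (List.mem_reverse.mp hx))
      (fun x hx => Nat.digits_lt_base (by norm_num) hx) hnat
  · intro h
    rw [h, Nat.ofDigits_digits]
    

-- A's string test agrees with the digit-list palindrome condition
lemma pv_strPal_iff (m : ℕ) :
    (PySem.Str.slice? (PySem.Int.toStr (↑m)) (some (-1)) none (-1) = some (PySem.Int.toStr (↑m))) ↔
    (Nat.digits 10 m).reverse = Nat.digits 10 m := by
  by_cases hm : 0 < m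
  · rw [PySem.Str.slice?]
    rw [pv_slice_start_neg_one]
    constructor
    · intro h
      have h2 : (PySem.Int.toStr (↑m : ℤ)).toList.reverse = (PySem.Int.toStr (↑m : ℤ)).toList := by
        have := congrArg String.toList (Option.some.inj h)
        simpa using this
      rw [PySem.Int.toList_toStr] at h2
      simp only [PySem.Int.toChars, if_neg (by omega : ¬ ((↑m : ℤ) < 0)), Int.toNat_natCast] at h2
      rw [pv_toDigits10 m hm] at h2
      simp only [List.reverse_reverse] at h2
      have h3 := congrArg List.reverse h2
      simp only [List.reverse_reverse] at h3
      rw [← List.map_reverse] at h3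
      exact pv_map_digitChar_inj _ _
        (fun x hx => Nat.digits_lt_base (by norm_num) (List.mem_reverse.mp hx))
        (fun x hx => Nat.digits_lt_base (by norm_num) hx) h3
    · intro h
      have h2 : (PySem.Int.toStr (↑m : ℤ)).toList.reverse = (PySem.Int.toStr (↑m : ℤ)).toList := by
        rw [PySem.Int.toList_toStr]
        simp only [PySem.Int.toChars, if_neg (by omega : ¬ ((↑m : ℤ) < 0)), Int.toNat_natCast]
        rw [pv_toDigits10 m hm, List.reverse_reverse, ← List.map_reverse, h]
      rw [h2]
      simp only [Option.map_some, String.ofList_toList]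
  · have h0 : m = 0 := by omega
    subst h0
    constructor
    · intro _; simp
    · intro _; decide

lemma pv_elem_iff (a : ℤ) (ha : 0 ≤ a) :
    (PySem.Str.slice? (PySem.Int.toStr a) (some (-1)) none (-1) = some (PySem.Int.toStr a)) ↔
    (pvRevLoop a 0 = a) := by
  obtain ⟨m, rfl⟩ := Int.eq_ofNat_of_zero_le ha
  rw [pv_strPal_iff, pv_rev_eq_iff]

-- ===== VERDICT (by name: the statement is the Claim_ definition above) =====
theorem gen_palindromic_spec : Claim_equal_gen_palindromic := by
  intro n _ hpre
  unfold Pre_gen_palindromic at hpre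
  unfold Spec_gen_palindromic gen_palindromic gen_palindromic_alt
  rw [if_pos hpre, if_pos hpre]
  apply PySem.List.foldl_congr_mem
  intro acc x hx
  have hx0 : 0 ≤ x := (PySem.List.mem_pyRange_one.mp hx).1
  simp only [pv_elem_iff x hx0]

-- crash-fix theorem: where A raises (n ≤ 0), B returns []
@[simp] theorem gen_palindromic_raises : Claim_raises_gen_palindromic := by
  unfold Claim_raises_gen_palindromic
  constructor
  · intro n _ h hpre
    exact absurd hpre (by unfold Pre_gen_palindromic Raises_gen_palindromic at *; omega)
  · exact ⟨by decide, by decide, by decide⟩
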